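-- pv_equiv track=rewrite | github.com/python-averyanov/averyanov | PZ_7/PZ_7-2.py | che
-- ===== SOURCE A (Python) =====
-- def che(s: str) -> int:
--     round = 0
--     square = 0
--     curly = 0
--
--     for i, char in enumerate(s):
--
--         if char == '(':
--             round += 1
--         elif char == ')':
--             if round == 0:
--                 return i + 1
--             round -= 1
--
--         elif char == '[':
--             square += 1
--         elif char == ']':
--             if square == 0:
--                 return i + 1
--             square -= 1
--
--         elif char == '{':
--             curly += 1
--         elif char == '}':
--             if curly == 0:
--                 return i + 1
--             curly -= 1
--
--     if round > 0:
--         return s.index('(') + 1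
--     if square > 0:
--         return s.index('[') + 1
--     if curly > 0:
--         return s.index('{') + 1
--
--     return 0  # Все правильно
-- ===== SOURCE B (Python) =====
-- def _scan(s, op, cl):
--     """First index of a closing bracket seen with counter 0 (else None), plus leftover opener count."""
--     cnt = 0
--     for i, ch in enumerate(s):
--         if ch == op:
--             cnt += 1
--         elif ch == cl:
--             if cnt == 0:
--                 return i, 0
--             cnt -= 1
--     return None, cnt
--
-- def che(s: str) -> int:
--     r = _scan(s, '(', ')')
--     q = _scan(s, '[', ']')
--     k = _scan(s, '{', '}')
--     best = None
--     for b, _ in (r, q, k):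
--         if b is not None and (best is None or b < best):
--             best = b
--     if best is not None:
--         return best + 1
--     if r[1]:
--         return s.index('(') + 1
--     if q[1]:
--         return s.index('[') + 1
--     if k[1]:
--         return s.index('{') + 1
--     return 0
-- ===== Notes on version B (the rewrite author's own statement) =====
-- stated objective: alternative
-- what changed: A's single pass with three interleaved counters is replaced by a per-bracket-pair scan helper run once for each of the three pairs, whose first-bad-closer indices are combined by a min fold and whose leftover counters drive the same post-loop priority order.
import Mathlib
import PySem

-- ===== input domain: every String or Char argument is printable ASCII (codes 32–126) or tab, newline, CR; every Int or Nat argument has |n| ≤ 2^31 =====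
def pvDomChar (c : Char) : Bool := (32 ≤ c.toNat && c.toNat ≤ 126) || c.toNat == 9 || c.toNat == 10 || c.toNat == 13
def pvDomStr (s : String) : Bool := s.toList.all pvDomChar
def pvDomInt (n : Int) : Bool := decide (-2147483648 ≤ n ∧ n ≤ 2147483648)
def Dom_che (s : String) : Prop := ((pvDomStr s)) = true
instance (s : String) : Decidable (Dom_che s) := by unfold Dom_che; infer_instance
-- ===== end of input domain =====

-- B replaces A's single three-counter pass by one independent per-bracket-pair scan run three
-- times and combined (objective: alternative decomposition; same asymptotic cost).
-- Python's s.index(c) is ported as PySem.Str.find s c: exact whenever c occurs in s, and both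
-- programs only reach it with a positive leftover counter, i.e. when c occurs.

-- ===== PORT A =====
-- A's loop: early return (i+1) is Except.error, falling off the loop yields the final counters.
def cheLoop : List Char → Nat → Nat → Nat → Nat → Except Nat (Nat × Nat × Nat)
  | [], _, r, q, c => .ok (r, q, c)
  | ch :: t, i, r, q, c =>
    if ch = '(' then cheLoop t (i+1) (r+1) q c
    else if ch = ')' then
      if r = 0 then .error (i+1) else cheLoop t (i+1) (r-1) q c
    else if ch = '[' then cheLoop t (i+1) r (q+1) c
    else if ch = ']' then
      if q = 0 then .error (i+1) else cheLoop t (i+1) r (q-1) c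
    else if ch = '{' then cheLoop t (i+1) r q (c+1)
    else if ch = '}' then
      if c = 0 then .error (i+1) else cheLoop t (i+1) r q (c-1)
    else cheLoop t (i+1) r q c

def che (s : String) : Int :=
  match cheLoop s.toList 0 0 0 0 with
  | .error n => (n : Int)
  | .ok (r, q, c) =>
    if r > 0 then PySem.Str.find s "(" + 1
    else if q > 0 then PySem.Str.find s "[" + 1
    else if c > 0 then PySem.Str.find s "{" + 1
    else 0

-- ===== PORT B =====
-- _scan: first closing bracket of this pair seen with counter 0 (else none), plus leftover count.
def cheScan (op cl : Char) : List Char → Nat → Nat → Option Nat × Nat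
  | [], _, cnt => (none, cnt)
  | ch :: t, i, cnt =>
    if ch = op then cheScan op cl t (i+1) (cnt+1)
    else if ch = cl then
      if cnt = 0 then (some i, 0) else cheScan op cl t (i+1) (cnt-1)
    else cheScan op cl t (i+1) cnt

-- the 'best'-update of B's small min loop
def chePick (best b : Option Nat) : Option Nat :=
  match b with
  | none => best
  | some j => match best with
    | none => some j
    | some m => if j < m then some j else some m

def che_alt (s : String) : Int :=
  let r := cheScan '(' ')' s.toList 0 0
  let q := cheScan '[' ']' s.toList 0 0
  let k := cheScan '{' '}' s.toList 0 0
  match chePick (chePick (chePick none r.1) q.1) k.1 with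
  | some m => (m : Int) + 1
  | none =>
    if r.2 ≠ 0 then PySem.Str.find s "(" + 1
    else if q.2 ≠ 0 then PySem.Str.find s "[" + 1
    else if k.2 ≠ 0 then PySem.Str.find s "{" + 1
    else 0

-- ===== PRECONDITION & SPEC =====
def Spec_che (s : String) (out : Int) : Prop := out = che_alt s
instance (s : String) (out : Int) : Decidable (Spec_che s out) := by unfold Spec_che; infer_instance

-- ===== CLAIM (what is proved, stated in full; the proofs are below) =====
def Claim_equal_che : Prop := ∀ (s : String), Dom_che s → Spec_che s (che s)

-- ===== LEMMAS AND PROOFS =====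

-- any bad-closer index reported by cheScan starting at i is ≥ i
theorem cheScan_fst_ge (op cl : Char) (l : List Char) :
    ∀ (i cnt j : Nat), (cheScan op cl l i cnt).1 = some j → i ≤ j := by
  induction l with
  | nil => intro i cnt j h; simp [cheScan] at h
  | cons ch t ih =>
    intro i cnt j h
    simp only [cheScan] at h
    split_ifs at h with h1 h2 h3
    · exact Nat.le_of_succ_le (ih (i+1) (cnt+1) j h)
    · simp at h; omega
    · exact Nat.le_of_succ_le (ih (i+1) (cnt-1) j h)
    · exact Nat.le_of_succ_le (ih (i+1) cnt j h)

-- the min-fold returns the lone low index when the other candidates are all larger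
theorem chePick_err1 (i : Nat) (qf kf : Option Nat)
    (hq : ∀ j, qf = some j → i < j) (hk : ∀ j, kf = some j → i < j) :
    chePick (chePick (chePick none (some i)) qf) kf = some i := by
  have h1 : chePick (chePick none (some i)) qf = some i := by
    rcases qf with _ | jq
    · rfl
    · have := hq jq rfl; simp only [chePick]; rw [if_neg (by omega)]
  rw [h1]
  rcases kf with _ | jk
  · rfl
  · have := hk jk rfl; simp only [chePick]; rw [if_neg (by omega)]

theorem chePick_err2 (i : Nat) (rf kf : Option Nat)
    (hr : ∀ j, rf = some j → i < j) (hk : ∀ j, kf = some j → i < j) :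
    chePick (chePick (chePick none rf) (some i)) kf = some i := by
  have h1 : chePick (chePick none rf) (some i) = some i := by
    rcases rf with _ | jr
    · rfl
    · have := hr jr rfl; simp only [chePick]; rw [if_pos (by omega)]
  rw [h1]
  rcases kf with _ | jk
  · rfl
  · have := hk jk rfl; simp only [chePick]; rw [if_neg (by omega)]

theorem chePick_err3 (i : Nat) (rf qf : Option Nat)
    (hr : ∀ j, rf = some j → i < j) (hq : ∀ j, qf = some j → i < j) :
    chePick (chePick (chePick none rf) qf) (some i) = some i := by
  rcases rf with _ | jr <;> rcases qf with _ | jq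
  · rfl
  · have := hq jq rfl; simp only [chePick]; rw [if_pos (by omega)]
  · have := hr jr rfl; simp only [chePick]; rw [if_pos (by omega)]
  · have h1 := hr jr rfl; have h2 := hq jq rfl
    by_cases h : jq < jr
    · simp only [chePick, if_pos h]; rw [if_pos (by omega)]
    · simp only [chePick, if_neg h]; rw [if_pos (by omega)]

-- A's single pass equals the combination of B's three independent scans
theorem cheLoop_eq (l : List Char) : ∀ (i r q c : Nat),
    cheLoop l i r q c =
      (match chePick (chePick (chePick none (cheScan '(' ')' l i r).1)
                              (cheScan '[' ']' l i q).1)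
                     (cheScan '{' '}' l i c).1 with
       | some m => .error (m + 1)
       | none => .ok ((cheScan '(' ')' l i r).2,
                      (cheScan '[' ']' l i q).2,
                      (cheScan '{' '}' l i c).2)) := by
  induction l with
  | nil => intro i r q c; simp [cheLoop, cheScan, chePick]
  | cons ch t ih =>
    intro i r q c
    by_cases h1 : ch = '('
    · subst h1; simp only [cheLoop, cheScan]; simp only [Char.reduceEq, if_true, if_false]; exact ih (i+1) (r+1) q c
    by_cases h2 : ch = ')'
    · subst h2
      by_cases hr0 : r = 0
      · subst hr0
        simp only [cheLoop, cheScan]; simp only [Char.reduceEq, if_true, if_false]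
        rw [chePick_err1 i _ _
          (fun j h => lt_of_lt_of_le (Nat.lt_succ_self i) (cheScan_fst_ge '[' ']' t (i+1) q j h))
          (fun j h => lt_of_lt_of_le (Nat.lt_succ_self i) (cheScan_fst_ge '{' '}' t (i+1) c j h))]
      · simp only [cheLoop, cheScan]; simp only [Char.reduceEq, if_true, if_false]
        rw [if_neg hr0, if_neg hr0]; exact ih (i+1) (r-1) q c
    by_cases h3 : ch = '['
    · subst h3; simp only [cheLoop, cheScan]; simp only [Char.reduceEq, if_true, if_false]; exact ih (i+1) r (q+1) c
    by_cases h4 : ch = ']'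
    · subst h4
      by_cases hq0 : q = 0
      · subst hq0
        simp only [cheLoop, cheScan]; simp only [Char.reduceEq, if_true, if_false]
        rw [chePick_err2 i _ _
          (fun j h => lt_of_lt_of_le (Nat.lt_succ_self i) (cheScan_fst_ge '(' ')' t (i+1) r j h))
          (fun j h => lt_of_lt_of_le (Nat.lt_succ_self i) (cheScan_fst_ge '{' '}' t (i+1) c j h))]
      · simp only [cheLoop, cheScan]; simp only [Char.reduceEq, if_true, if_false]
        rw [if_neg hq0, if_neg hq0]; exact ih (i+1) r (q-1) c
    by_cases h5 : ch = '{'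
    · subst h5; simp only [cheLoop, cheScan]; simp only [Char.reduceEq, if_true, if_false]; exact ih (i+1) r q (c+1)
    by_cases h6 : ch = '}'
    · subst h6
      by_cases hc0 : c = 0
      · subst hc0
        simp only [cheLoop, cheScan]; simp only [Char.reduceEq, if_true, if_false]
        rw [chePick_err3 i _ _
          (fun j h => lt_of_lt_of_le (Nat.lt_succ_self i) (cheScan_fst_ge '(' ')' t (i+1) r j h))
          (fun j h => lt_of_lt_of_le (Nat.lt_succ_self i) (cheScan_fst_ge '[' ']' t (i+1) q j h))]
      · simp only [cheLoop, cheScan]; simp only [Char.reduceEq, if_true, if_false]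
        rw [if_neg hc0, if_neg hc0]; exact ih (i+1) r q (c-1)
    · simp only [cheLoop, cheScan]
      rw [if_neg h1, if_neg h2, if_neg h3, if_neg h4, if_neg h5, if_neg h6,
          if_neg h1, if_neg h2, if_neg h3, if_neg h4, if_neg h5, if_neg h6]
      exact ih (i+1) r q c

-- ===== VERDICT (by name: the statement is the Claim_ definition above) =====
theorem che_spec : Claim_equal_che := by
  intro s _
  unfold Spec_che che che_alt
  rw [cheLoop_eq]
  cases hE : chePick (chePick (chePick none (cheScan '(' ')' s.toList 0 0).1)
                              (cheScan '[' ']' s.toList 0 0).1)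
                     (cheScan '{' '}' s.toList 0 0).1 with
  | some m => simp [hE]
  | none => simp only [hE]; split_ifs <;> first | rfl | omega
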